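-- pv_equiv track=rewrite | github.com/Polyconseil/django-cid | setup.py | clean_history
-- ===== SOURCE A (Python) =====
-- def clean_history(history):
--     # PyPI does not allow the `raw` directive. We'll laboriously
--     # replace it. Hang tight, it's going to be ugly.
--     history = history.replace('|backward-incompatible|', '**backward incompatible:** ')
--     lines = []
--     for line in history.split('\n'):
--         if line.startswith('.. role:: raw-html'):
--             break
--         lines.append(line)
--     return '\n'.join(lines)
-- ===== SOURCE B (Python) =====
-- def clean_history(history):
--     history = history.replace('|backward-incompatible|', '**backward incompatible:** ')
--     if history.startswith('.. role:: raw-html'):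
--         return ''
--     i = history.find('\n.. role:: raw-html')
--     return history if i == -1 else history[:i]
-- ===== Notes on version B (the rewrite author's own statement) =====
-- stated objective: simpler
-- what changed: Instead of splitting the text into a list of lines, looping with break, and re-joining, B locates the sentinel with one startswith check at position 0 plus a single str.find of ' '+sentinel and returns one slice (or the string unchanged).
import Mathlib
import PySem

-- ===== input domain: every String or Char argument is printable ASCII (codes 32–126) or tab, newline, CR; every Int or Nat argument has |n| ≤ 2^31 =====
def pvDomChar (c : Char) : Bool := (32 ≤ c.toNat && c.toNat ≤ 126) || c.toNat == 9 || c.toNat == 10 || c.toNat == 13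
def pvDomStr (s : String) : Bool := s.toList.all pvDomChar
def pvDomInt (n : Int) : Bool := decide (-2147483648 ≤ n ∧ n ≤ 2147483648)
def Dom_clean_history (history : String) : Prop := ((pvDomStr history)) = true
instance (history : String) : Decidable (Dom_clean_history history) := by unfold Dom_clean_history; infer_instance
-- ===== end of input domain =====

-- B replaces A's split-into-lines / loop-with-break / re-join by a single substring search
-- (startswith at position 0, else find of "\n"+sentinel) and one slice; objective: simpler/idiomatic.

-- ===== PORT A =====
-- the for-loop with `break`: collect lines until one starts with the sentinel
def chA_loop : List String → List String
  | [] => []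
  | line :: rest =>
    if PySem.Str.startswith line ".. role:: raw-html" then []
    else line :: chA_loop rest

def clean_history (history : String) : String :=
  let h := PySem.Str.replace history "|backward-incompatible|" "**backward incompatible:** "
  let lines := chA_loop ((PySem.Str.split? h "\n").getD [])
  PySem.Str.join "\n" lines

-- ===== PORT B =====
def clean_history_alt (history : String) : String :=
  let h := PySem.Str.replace history "|backward-incompatible|" "**backward incompatible:** "
  if PySem.Str.startswith h ".. role:: raw-html" then ""
  else
    let i := PySem.Str.find h "\n.. role:: raw-html"
    if i = -1 then h else PySem.Str.slice h none (some i)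

-- ===== PRECONDITION & SPEC =====
def Spec_clean_history (history : String) (out : String) : Prop := out = clean_history_alt history
instance (history : String) (out : String) : Decidable (Spec_clean_history history out) := by unfold Spec_clean_history; infer_instance

-- ===== CLAIM (what is proved, stated in full; the proofs are below) =====
def Claim_equal_clean_history : Prop := ∀ (history : String), Dom_clean_history history → Spec_clean_history history (clean_history history)

-- ===== LEMMAS AND PROOFS =====

-- the sentinel prefix, as characters
def pvP : List Char := ".. role:: raw-html".toList

-- char-level image of A's loop
def loopC : List (List Char) → List (List Char)
  | [] => []
  | l :: rest => if pvP.isPrefixOf l then [] else l :: loopC rest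

-- char-level image of B's body
def pvB (cs : List Char) : List Char :=
  if pvP.isPrefixOf cs then []
  else if PySem.Chars.find cs ('\n' :: pvP) = -1 then cs
  else PySem.List.slice cs none (some (PySem.Chars.find cs ('\n' :: pvP)))

def consHead (x : List Char) : List (List Char) → List (List Char)
  | [] => [x]
  | l :: ls => (x ++ l) :: ls

def linesOf : List Char → List (List Char)
  | [] => [[]]
  | c :: rest => if c = '\n' then [] :: linesOf rest else consHead [c] (linesOf rest)

theorem linesOf_ne_nil (cs : List Char) : linesOf cs ≠ [] := by
  cases cs with
  | nil => simp [linesOf]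
  | cons c rest =>
    simp only [linesOf]
    split
    · simp
    · cases h : linesOf rest <;> simp [consHead]

theorem consHead_consHead (x y : List Char) (ls : List (List Char)) :
    consHead x (consHead y ls) = consHead (x ++ y) ls := by
  cases ls <;> simp [consHead]

theorem splitOn_go_eq (fuel : Nat) : ∀ (l cur : List Char) (acc : List (List Char)),
    l.length ≤ fuel →
    PySem.Chars.splitOn.go ['\n'] fuel l cur acc = acc.reverse ++ consHead cur.reverse (linesOf l) := by
  induction fuel with
  | zero =>
    intro l cur acc h
    have hl : l = [] := by simpa using h
    subst hl
    simp [PySem.Chars.splitOn.go, consHead, linesOf]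
  | succ f ih =>
    intro l cur acc h
    cases l with
    | nil =>
      show (cur.reverse :: acc).reverse = _
      simp [consHead, linesOf]
    | cons c rest =>
      rw [show PySem.Chars.splitOn.go ['\n'] (f+1) (c::rest) cur acc =
            if ['\n'].isPrefixOf (c::rest) then
              PySem.Chars.splitOn.go ['\n'] f (List.drop 1 (c::rest)) [] (cur.reverse :: acc)
            else PySem.Chars.splitOn.go ['\n'] f rest (c::cur) acc from rfl]
      by_cases hc : c = '\n'
      · subst hc
        rw [if_pos (by simp [List.isPrefixOf])]
        rw [ih _ _ _ (by simpa using Nat.le_of_succ_le_succ h)]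
        cases hrest : linesOf rest with
        | nil => exact absurd hrest (linesOf_ne_nil rest)
        | cons l0 ls0 => simp [linesOf, consHead, hrest]
      · rw [if_neg (by simp [List.isPrefixOf]; intro hh; exact hc hh.symm)]
        rw [ih _ _ _ (by simpa using Nat.le_of_succ_le_succ h)]
        simp only [linesOf, if_neg hc, List.reverse_cons]
        rw [consHead_consHead]

theorem splitOn_eq_linesOf (cs : List Char) : PySem.Chars.splitOn cs ['\n'] = linesOf cs := by
  show PySem.Chars.splitOn.go ['\n'] (cs.length + 1) cs [] [] = _
  rw [splitOn_go_eq _ _ _ _ (by omega)]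
  cases h : linesOf cs with
  | nil => exact absurd h (linesOf_ne_nil cs)
  | cons l0 ls0 => simp [consHead]

theorem no_nl_linesOf (cs : List Char) : ∀ l ∈ linesOf cs, '\n' ∉ l := by
  induction cs with
  | nil => simp [linesOf]
  | cons c rest ih =>
    simp only [linesOf]
    by_cases hc : c = '\n'
    · subst hc
      simp only [if_pos]
      intro l hl
      rcases List.mem_cons.mp hl with h | h
      · subst h; simp
      · exact ih l h
    · rw [if_neg hc]
      cases hrest : linesOf rest with
      | nil => exact absurd hrest (linesOf_ne_nil rest)
      | cons l0 ls0 =>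
        simp only [consHead]
        intro l hl
        rcases List.mem_cons.mp hl with h | h
        · subst h
          simp only [List.mem_cons, List.singleton_append]
          rintro (h | h)
          · exact hc h.symm
          · exact ih l0 (by simp [hrest]) h
        · exact ih l (by simp [hrest, h])

theorem intercalate_cons_cons (c : Char) (l0 : List Char) (ls : List (List Char)) :
    ['\n'].intercalate ((c :: l0) :: ls) = c :: ['\n'].intercalate (l0 :: ls) := by
  cases ls <;> simp [List.intercalate]

theorem intercalate_linesOf (cs : List Char) : ['\n'].intercalate (linesOf cs) = cs := by
  induction cs with
  | nil => simp [linesOf, List.intercalate]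
  | cons c rest ih =>
    simp only [linesOf]
    cases hrest : linesOf rest with
    | nil => exact absurd hrest (linesOf_ne_nil rest)
    | cons l0 ls0 =>
      rw [hrest] at ih
      by_cases hc : c = '\n'
      · subst hc
        rw [if_pos rfl, show (([] : List Char) :: l0 :: ls0) = ([] : List Char) :: l0 :: ls0 from rfl]
        have : ['\n'].intercalate ([] :: l0 :: ls0) = '\n' :: ['\n'].intercalate (l0 :: ls0) := by
          simp [List.intercalate]
        rw [this, ih]
      · rw [if_neg hc]
        simp only [consHead, List.singleton_append]
        rw [intercalate_cons_cons, ih]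

theorem find_go_shift (sub : List Char) (hsub : sub ≠ []) : ∀ (s : List Char) (k : Nat),
    PySem.Chars.find.go sub s k =
      if PySem.Chars.find s sub = -1 then -1 else (k : Int) + PySem.Chars.find s sub := by
  intro s
  induction s with
  | nil =>
    intro k
    show (if sub.isEmpty then (k:Int) else -1) = _
    have h1 : sub.isEmpty = false := by simpa [List.isEmpty_iff] using hsub
    have h2 : PySem.Chars.find [] sub = -1 := by
      show (if sub.isEmpty then ((0:Nat):Int) else -1) = -1
      simp [h1]
    simp [h1, h2]
  | cons c t ih =>
    intro k
    show (if sub.isPrefixOf (c::t) then (k:Int) else PySem.Chars.find.go sub t (k+1)) = _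
    have hf : PySem.Chars.find (c::t) sub =
        if sub.isPrefixOf (c::t) then (0:Int) else PySem.Chars.find.go sub t 1 := rfl
    by_cases hp : sub.isPrefixOf (c::t)
    · simp [hp, hf]
    · rw [if_neg hp, hf, if_neg hp, ih (k+1), ih 1]
      have hge := PySem.Chars.neg_one_le_find t sub
      by_cases h1 : PySem.Chars.find t sub = -1
      · simp [h1]
      · rw [if_neg h1, if_neg h1, if_neg (by omega)]
        push_cast
        ring

theorem find_step (P l r : List Char) (hl : '\n' ∉ l) :
    PySem.Chars.find (l ++ '\n' :: r) ('\n' :: P) =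
      if P.isPrefixOf r then (l.length : Int)
      else if PySem.Chars.find r ('\n' :: P) = -1 then -1
      else (l.length : Int) + 1 + PySem.Chars.find r ('\n' :: P) := by
  induction l with
  | nil =>
    have hfind : PySem.Chars.find ('\n' :: r) ('\n' :: P) =
        if ('\n'::P).isPrefixOf ('\n'::r) then (0:Int) else PySem.Chars.find.go ('\n'::P) r 1 := rfl
    rw [List.nil_append, hfind]
    by_cases hp : P.isPrefixOf r
    · rw [if_pos (by simp [List.isPrefixOf, hp]), if_pos hp]; simp
    · rw [if_neg (by simp [List.isPrefixOf, hp]), if_neg hp,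
          find_go_shift ('\n'::P) (by simp) r 1]
      by_cases h1 : PySem.Chars.find r ('\n'::P) = -1 <;> simp [h1]
  | cons a l' ih =>
    have ha : a ≠ '\n' := fun h => hl (by simp [h])
    have ha' : ('\n' : Char) ≠ a := Ne.symm ha
    have hl' : '\n' ∉ l' := fun h => hl (by simp [h])
    have hfind : PySem.Chars.find ((a :: l') ++ '\n' :: r) ('\n' :: P) =
        if ('\n'::P).isPrefixOf (a :: (l' ++ '\n' :: r)) then (0:Int)
        else PySem.Chars.find.go ('\n'::P) (l' ++ '\n' :: r) 1 := rfl
    rw [hfind, if_neg (by simp [ha']),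
        find_go_shift ('\n'::P) (by simp) _ 1, ih hl']
    by_cases hp : P.isPrefixOf r
    · rw [if_pos hp, if_pos hp, if_neg (show ¬((l'.length : Int) = -1) by omega)]
      push_cast [List.length_cons]
      ring
    · rw [if_neg hp, if_neg hp]
      by_cases h1 : PySem.Chars.find r ('\n'::P) = -1
      · simp [h1]
      · have h0 : (0:Int) ≤ PySem.Chars.find r ('\n'::P) := by
          have := PySem.Chars.neg_one_le_find r ('\n'::P)
          omega
        rw [if_neg h1, if_neg h1, if_neg (by omega)]
        push_cast [List.length_cons]
        ring

theorem prefix_through_line (p : List Char) (hp : '\n' ∉ p) : ∀ (l r : List Char),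
    p <+: l ++ '\n' :: r → p <+: l := by
  intro l
  induction l generalizing p with
  | nil =>
    intro r h
    cases p with
    | nil => exact List.nil_prefix
    | cons c p' =>
      rcases List.cons_prefix_cons.mp h with ⟨hc, _⟩
      exact absurd (by simp [hc]) hp
  | cons a l' ih =>
    intro r h
    cases p with
    | nil => exact List.nil_prefix
    | cons c p' =>
      rcases List.cons_prefix_cons.mp h with ⟨hc, hrest⟩
      subst hc
      exact List.cons_prefix_cons.mpr ⟨rfl, ih p' (fun hm => hp (by simp [hm])) r hrest⟩

theorem prefix_head (p l1 : List Char) (hp : '\n' ∉ p) (ls : List (List Char)) :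
    p <+: ['\n'].intercalate (l1 :: ls) ↔ p <+: l1 := by
  cases ls with
  | nil =>
    simp [List.intercalate]
  | cons l2 ls' =>
    constructor
    · intro h
      have : ['\n'].intercalate (l1 :: l2 :: ls') = l1 ++ '\n' :: ['\n'].intercalate (l2 :: ls') := by
        simp [List.intercalate]
      rw [this] at h
      exact prefix_through_line p hp l1 _ h
    · intro h
      have : ['\n'].intercalate (l1 :: l2 :: ls') = l1 ++ '\n' :: ['\n'].intercalate (l2 :: ls') := by
        simp [List.intercalate]
      rw [this]
      exact h.trans (List.prefix_append _ _)

theorem core (ls : List (List Char)) (hne : ls ≠ []) (hn : ∀ l ∈ ls, '\n' ∉ l) :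
    ['\n'].intercalate (loopC ls) = pvB (['\n'].intercalate ls) := by
  have hpnl : '\n' ∉ pvP := by decide
  induction ls with
  | nil => exact absurd rfl hne
  | cons l ls' ih =>
    cases ls' with
    | nil =>
      have hnl : '\n' ∉ l := hn l (by simp)
      have hil : ['\n'].intercalate [l] = l := by simp [List.intercalate]
      by_cases hp : pvP.isPrefixOf l
      · simp only [loopC, pvB, hil, if_pos hp]
        simp [List.intercalate]
      · have hfind : PySem.Chars.find l ('\n' :: pvP) = -1 := by
          rw [PySem.Chars.find_eq_neg_one_iff]
          intro hinf
          exact hnl (hinf.subset (by simp))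
        simp only [loopC, pvB, hil, if_neg hp, hfind]
        simp
    | cons l1 ls'' =>
      have hnl : '\n' ∉ l := hn l (by simp)
      have hsplit : ['\n'].intercalate (l :: l1 :: ls'') =
          l ++ '\n' :: ['\n'].intercalate (l1 :: ls'') := by simp [List.intercalate]
      have ihh := ih (by simp) (fun x hx => hn x (by simp [hx]))
      have hhead : pvP.isPrefixOf (['\n'].intercalate (l1 :: ls'')) = pvP.isPrefixOf l1 := by
        by_cases h1 : pvP.isPrefixOf l1
        · rw [h1, List.isPrefixOf_iff_prefix]
          exact (prefix_head pvP l1 hpnl ls'').mpr (List.isPrefixOf_iff_prefix.mp h1)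
        · rw [Bool.eq_false_iff.mpr h1, Bool.eq_false_iff]
          intro hcontr
          exact h1 (List.isPrefixOf_iff_prefix.mpr
            ((prefix_head pvP l1 hpnl ls'').mp (List.isPrefixOf_iff_prefix.mp hcontr)))
      by_cases hp : pvP.isPrefixOf l
      · have hpc : pvP.isPrefixOf (['\n'].intercalate (l :: l1 :: ls'')) := by
          rw [List.isPrefixOf_iff_prefix] at hp ⊢
          rw [hsplit]
          exact hp.trans (List.prefix_append _ _)
        simp only [loopC, if_pos hp, pvB, if_pos hpc]
        simp [List.intercalate]
      · have hloop : loopC (l :: l1 :: ls'') = l :: loopC (l1 :: ls'') := by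
          show (if pvP.isPrefixOf l then [] else l :: loopC (l1 :: ls'')) = _
          rw [if_neg hp]
        have hpc : ¬ pvP.isPrefixOf (l ++ '\n' :: ['\n'].intercalate (l1 :: ls'')) := by
          rw [List.isPrefixOf_iff_prefix]
          intro hcontr
          exact hp (List.isPrefixOf_iff_prefix.mpr (prefix_through_line pvP hpnl l _ hcontr))
        have hstep := find_step pvP l (['\n'].intercalate (l1 :: ls'')) hnl
        rw [hloop, hsplit]
        simp only [pvB, Bool.eq_false_iff.mpr hpc, Bool.false_eq_true, if_false, hstep, hhead]
        by_cases hp1 : pvP.isPrefixOf l1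
        · -- the next line starts with the sentinel: the loop keeps exactly l, find points at l.length
          have hloop1 : loopC (l1 :: ls'') = [] := by
            show (if pvP.isPrefixOf l1 then [] else l1 :: loopC ls'') = _
            rw [if_pos hp1]
          simp only [hp1, if_true, hloop1]
          rw [if_neg (show ¬((l.length : Int) = -1) by omega),
              PySem.List.slice_to _ (by omega),
              show ((l.length : Int)).toNat = l.length by omega]
          simp [List.intercalate]
        · have hp1f : pvP.isPrefixOf l1 = false := Bool.eq_false_iff.mpr hp1
          have hloop1 : loopC (l1 :: ls'') = l1 :: loopC ls'' := by
            show (if pvP.isPrefixOf l1 then [] else l1 :: loopC ls'') = _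
            rw [if_neg hp1]
          have hcons : ['\n'].intercalate (l :: l1 :: loopC ls'') =
              l ++ '\n' :: ['\n'].intercalate (l1 :: loopC ls'') := by simp [List.intercalate]
          simp only [pvB, hhead, hp1f, Bool.false_eq_true, if_false] at ihh
          simp only [hp1f, Bool.false_eq_true, if_false]
          by_cases hfr : PySem.Chars.find (['\n'].intercalate (l1 :: ls'')) ('\n' :: pvP) = -1
          · rw [if_pos hfr] at ihh
            rw [hfr, if_pos rfl, if_pos rfl, hloop1, hcons, ← hloop1, ihh]
          · have h0 : (0:Int) ≤ PySem.Chars.find (['\n'].intercalate (l1 :: ls'')) ('\n' :: pvP) := by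
              have := PySem.Chars.neg_one_le_find (['\n'].intercalate (l1 :: ls'')) ('\n' :: pvP)
              omega
            rw [if_neg hfr] at ihh
            rw [if_neg hfr, if_neg (by omega), hloop1, hcons, ← hloop1, ihh,
                PySem.List.slice_to _ (by omega), PySem.List.slice_to _ (by omega)]
            set i := PySem.Chars.find (['\n'].intercalate (l1 :: ls'')) ('\n' :: pvP) with hi
            rw [show ((l.length : Int) + 1 + i).toNat = l.length + 1 + i.toNat by omega,
                List.take_append,
                List.take_of_length_le (show l.length ≤ l.length + 1 + i.toNat by omega),
                show l.length + 1 + i.toNat - l.length = i.toNat + 1 by omega,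
                List.take_succ_cons]

theorem loop_map (ls : List (List Char)) :
    chA_loop (ls.map String.ofList) = (loopC ls).map String.ofList := by
  induction ls with
  | nil => simp [chA_loop, loopC]
  | cons l ls' ih =>
    simp only [List.map_cons, chA_loop, loopC]
    have hs : PySem.Str.startswith (String.ofList l) ".. role:: raw-html" = pvP.isPrefixOf l := by
      simp [PySem.Chars.startswith, pvP]
    rw [hs]
    by_cases hp : pvP.isPrefixOf l <;> simp [hp, ih]

theorem body_eq (h : String) :
    PySem.Str.join "\n" (chA_loop ((PySem.Str.split? h "\n").getD [])) =
      (if PySem.Str.startswith h ".. role:: raw-html" then ""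
       else if PySem.Str.find h "\n.. role:: raw-html" = -1 then h
       else PySem.Str.slice h none (some (PySem.Str.find h "\n.. role:: raw-html"))) := by
  have hnl : ("\n" : String).toList = ['\n'] := by decide
  have hsub : ("\n.. role:: raw-html" : String).toList = '\n' :: pvP := by decide
  have hsplit : (PySem.Str.split? h "\n").getD [] = (linesOf h.toList).map String.ofList := by
    simp [PySem.Str.split?, PySem.Chars.split?, hnl, splitOn_eq_linesOf]
  rw [hsplit, loop_map]
  refine String.toList_inj.mp ?_
  have hL : (PySem.Str.join "\n" ((loopC (linesOf h.toList)).map String.ofList)).toList =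
      ['\n'].intercalate (loopC (linesOf h.toList)) := by
    simp [PySem.Str.toList_join, PySem.Chars.join, hnl, Function.comp_def]
  rw [hL, core (linesOf h.toList) (linesOf_ne_nil _) (no_nl_linesOf _), intercalate_linesOf]
  have c1 : PySem.Str.startswith h ".. role:: raw-html" = pvP.isPrefixOf h.toList := by
    simp [PySem.Chars.startswith, pvP]
  have c2 : PySem.Str.find h "\n.. role:: raw-html" = PySem.Chars.find h.toList ('\n' :: pvP) := by
    simp [hsub]
  simp only [pvB, c1, c2, apply_ite String.toList]
  split_ifs with h1 h2
  · simp
  · rfl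
  · simp [PySem.Str.toList_slice, PySem.Chars.slice]

-- ===== VERDICT (by name: the statement is the Claim_ definition above) =====
theorem clean_history_spec : Claim_equal_clean_history := by
  intro history _
  unfold Spec_clean_history clean_history clean_history_alt
  exact body_eq _
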